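-- pv_equiv track=rewrite | github.com/xyplex3/fabric-patterns-hub | scripts/filter.py | normalize_section_spacing
-- ===== SOURCE A (Python) =====
-- def normalize_section_spacing(text: str) -> str:
--     """Ensure one blank line before markdown headers and HR separators."""
--     lines = text.split("\n")
--     result = []
--     for i, line in enumerate(lines):
--         is_header = line.startswith("#")
--         is_separator = line.strip() == "---"
--         # Skip duplicate separators
--         if is_separator and result:
--             prev_non_blank = next((ln for ln in reversed(result) if ln.strip()), None)
--             if prev_non_blank == "---":
--                 continue
--         if i > 0 and (is_header or is_separator):
--             # Add blank line before if previous line isn't already blank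
--             if result and result[-1].strip():
--                 result.append("")
--         result.append(line)
--     return "\n".join(result)
-- ===== SOURCE B (Python) =====
-- def normalize_section_spacing(text: str) -> str:
--     """Ensure one blank line before markdown headers and HR separators."""
--     out = []
--     last_nonblank = None  # most recent non-blank line already emitted
--     for i, line in enumerate(text.split("\n")):
--         stripped = line.strip()
--         if stripped == "---":
--             if out and last_nonblank == "---":
--                 continue
--             if i > 0 and out and out[-1].strip():
--                 out.append("")
--         elif line.startswith("#"):
--             if i > 0 and out and out[-1].strip():
--                 out.append("")
--         out.append(line)
--         if stripped:
--             last_nonblank = line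
--     return "\n".join(out)
-- ===== Notes on version B (the rewrite author's own statement) =====
-- stated objective: simpler
-- what changed: Replaces A's per-separator backward scan over reversed(result) by a running last_nonblank variable maintained in one forward pass, restructuring the loop body as a separator/header/plain branch.
import Mathlib
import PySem

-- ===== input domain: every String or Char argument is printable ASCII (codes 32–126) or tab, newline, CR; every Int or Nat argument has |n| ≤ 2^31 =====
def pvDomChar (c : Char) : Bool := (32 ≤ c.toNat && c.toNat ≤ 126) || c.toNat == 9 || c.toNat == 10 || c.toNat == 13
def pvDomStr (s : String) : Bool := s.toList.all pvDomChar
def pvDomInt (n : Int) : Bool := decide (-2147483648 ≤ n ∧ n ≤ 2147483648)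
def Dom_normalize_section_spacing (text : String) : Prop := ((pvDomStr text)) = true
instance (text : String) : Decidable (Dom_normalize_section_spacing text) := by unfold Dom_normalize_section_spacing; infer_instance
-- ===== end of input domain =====

-- B replaces A's backward reversed() scan for the previous non-blank line by a running
-- last_nonblank state maintained in the single forward pass (objective: simpler).

-- shared one-line predicate: Python truthiness of line.strip()
def nssNonblank (ln : String) : Bool := PySem.Str.strip ln != ""

-- ===== PORT A =====
def nssStepA (acc : List String) (p : Int × String) : List String :=
  let i := p.1
  let line := p.2
  let is_header := PySem.Str.startswith line "#"
  let is_separator := PySem.Str.strip line == "---"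
  -- skip duplicate separators: backward scan over the emitted lines
  if is_separator && !acc.isEmpty &&
      (acc.reverse.find? nssNonblank == some "---") then
    acc
  else
    let acc1 :=
      if decide (0 < i) && (is_header || is_separator) &&
          (!acc.isEmpty && (acc.getLast?.any nssNonblank)) then
        acc ++ [""]
      else acc
    acc1 ++ [line]

def normalize_section_spacing (text : String) : String :=
  -- text.split("\n"): sep ≠ "" so split? is always `some`
  let lines := (PySem.Str.split? text "\n").getD []
  PySem.Str.join "\n" ((PySem.List.enumerate lines 0).foldl nssStepA [])

-- ===== PORT B =====
def nssStepB (st : List String × Option String) (p : Int × String) : List String × Option String :=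
  let out := st.1
  let last := st.2
  let line := p.2
  let stripped := PySem.Str.strip line
  -- emit: append `line` to out1, then update last_nonblank if line is non-blank
  let emit : List String → List String × Option String := fun out1 =>
    (out1 ++ [line], if stripped != "" then some line else last)
  if stripped == "---" then
    if !out.isEmpty && last == some "---" then
      (out, last)
    else
      emit (if decide (0 < p.1) && !out.isEmpty && (out.getLast?.any nssNonblank) then out ++ [""] else out)
  else if PySem.Str.startswith line "#" then
    emit (if decide (0 < p.1) && !out.isEmpty && (out.getLast?.any nssNonblank) then out ++ [""] else out)
  else
    emit out

def normalize_section_spacing_alt (text : String) : String :=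
  -- text.split("\n"): sep ≠ "" so split? is always `some`
  let lines := (PySem.Str.split? text "\n").getD []
  PySem.Str.join "\n" (((PySem.List.enumerate lines 0).foldl nssStepB ([], none)).1)

-- ===== PRECONDITION & SPEC =====
def Spec_normalize_section_spacing (text : String) (out : String) : Prop := out = normalize_section_spacing_alt text
instance (text : String) (out : String) : Decidable (Spec_normalize_section_spacing text out) := by unfold Spec_normalize_section_spacing; infer_instance

-- ===== CLAIM (what is proved, stated in full; the proofs are below) =====
def Claim_equal_normalize_section_spacing : Prop := ∀ (text : String), Dom_normalize_section_spacing text → Spec_normalize_section_spacing text (normalize_section_spacing text)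

-- ===== LEMMAS AND PROOFS =====

lemma nssNonblank_empty : nssNonblank "" = false := by decide

-- the invariant: B's last_nonblank is A's reversed-scan result
def nssInv (acc : List String) (last : Option String) : Prop :=
  last = acc.reverse.find? nssNonblank

lemma step_eq (p : Int × String) (acc : List String) (last : Option String)
    (h : nssInv acc last) :
    nssStepA acc p = (nssStepB (acc, last) p).1 ∧
      nssInv (nssStepA acc p) ((nssStepB (acc, last) p).2) := by
  unfold nssInv at h ⊢
  subst h
  obtain ⟨i, line⟩ := p
  simp only [nssStepA, nssStepB]
  by_cases hsep : PySem.Str.strip line = "---"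
  · have hnb : nssNonblank line = true := by simp [nssNonblank, hsep]
    by_cases hskip : (!acc.isEmpty && (acc.reverse.find? nssNonblank == some "---")) = true
    · simp [hsep, hskip]
    · simp [hsep, hskip, and_assoc, nssNonblank]
  · have hsep' : (PySem.Str.strip line == "---") = false := by simp [hsep]
    by_cases hhd : PySem.Str.startswith line "#" = true
    all_goals cases hnb : nssNonblank line <;>
      simp_all [nssNonblank, and_assoc] <;>
      split_ifs <;> simp [nssNonblank_empty]

lemma fold_eq (ps : List (Int × String)) (acc : List String) (last : Option String)
    (h : nssInv acc last) :
    ps.foldl nssStepA acc = (ps.foldl nssStepB (acc, last)).1 := by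
  induction ps generalizing acc last with
  | nil => rfl
  | cons p ps ih =>
    obtain ⟨h1, h2⟩ := step_eq p acc last h
    have h2' : nssInv (nssStepB (acc, last) p).1 (nssStepB (acc, last) p).2 := by
      rw [← h1]; exact h2
    simp only [List.foldl_cons]
    rw [h1]
    simpa using ih _ _ h2'

-- ===== VERDICT (by name: the statement is the Claim_ definition above) =====
theorem normalize_section_spacing_spec : Claim_equal_normalize_section_spacing := by
  intro text _
  unfold Spec_normalize_section_spacing normalize_section_spacing normalize_section_spacing_alt
  exact congrArg (PySem.Str.join "\n")
    (fold_eq (PySem.List.enumerate ((PySem.Str.split? text "\n").getD []) 0) [] none rfl)
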